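-- pv_equiv track=rewrite | github.com/pypi-data/pypi-mirror-389 | packages/docx-format-translate/docx_format_translate-0.1.0-py3-none-any.whl/utils.py | split_with_spaces
-- ===== SOURCE A (Python) =====
-- def split_with_spaces(text):
--     """
--     按空格分割文本，但保留空格作为独立的元素
--     """
--     if not text:
--         return []
--
--     result = []
--     current_word = ''
--
--     for char in text:
--         if char == ' ':
--             if current_word:
--                 result.append(current_word)
--                 current_word = ''
--             result.append(' ')
--         else:
--             current_word += char
--
--     if current_word:
--         result.append(current_word)
--
--     return result
-- ===== SOURCE B (Python) =====
-- import re
--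
-- def split_with_spaces(text):
--     if not text:
--         return []
--     return re.findall(r'[^ ]+| ', text)
-- ===== Notes on version B (the rewrite author's own statement) =====
-- stated objective: idiomatic
-- what changed: Replaces the explicit per-character loop with a string accumulator by a single regex findall whose alternation matches a maximal non-space run or one literal space.
import Mathlib
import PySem

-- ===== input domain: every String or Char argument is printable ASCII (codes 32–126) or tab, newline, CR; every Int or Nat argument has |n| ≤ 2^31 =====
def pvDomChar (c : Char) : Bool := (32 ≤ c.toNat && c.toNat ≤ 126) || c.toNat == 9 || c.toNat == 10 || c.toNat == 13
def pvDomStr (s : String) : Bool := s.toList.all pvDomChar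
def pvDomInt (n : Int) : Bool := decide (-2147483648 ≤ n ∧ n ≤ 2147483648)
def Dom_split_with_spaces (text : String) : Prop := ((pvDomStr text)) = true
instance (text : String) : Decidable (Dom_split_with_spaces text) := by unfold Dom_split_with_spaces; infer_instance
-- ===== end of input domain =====

-- B replaces A's explicit character loop with accumulator by a regex-findall-style
-- maximal-munch tokenizer (idiomatic; same cost).

-- ===== PORT A =====
-- one loop iteration of A: state is (result, current_word), current_word as List Char
def pvStepA (st : List String × List Char) (c : Char) : List String × List Char :=
  if c = ' ' then
    ((if st.2 ≠ [] then st.1 ++ [String.mk st.2] else st.1) ++ [" "], [])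
  else (st.1, st.2 ++ [c])

-- the trailing 'if current_word: result.append(current_word)'
def pvFlushA (st : List String × List Char) : List String :=
  if st.2 ≠ [] then st.1 ++ [String.mk st.2] else st.1

def split_with_spaces (text : String) : List String :=
  if text = "" then []
  else pvFlushA (text.toList.foldl pvStepA ([], []))

-- ===== PORT B =====
-- hand-ported semantics of re.findall(r'[^ ]+| ', text): at each position the regex
-- matches a maximal run of non-space characters, or else a single literal space.
def pvFindallTokens : List Char → List (List Char)
  | [] => []
  | c :: cs =>
    if c = ' ' then [' '] :: pvFindallTokens cs
    else (c :: cs.takeWhile (· ≠ ' ')) :: pvFindallTokens (cs.dropWhile (· ≠ ' '))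
termination_by cs => cs.length
decreasing_by
  · simp
  · have := List.length_dropWhile_le (p := (· ≠ ' ')) (l := cs)
    simp only [List.length_cons]
    omega

def split_with_spaces_alt (text : String) : List String :=
  if text = "" then []
  else (pvFindallTokens text.toList).map String.mk

-- ===== PRECONDITION & SPEC =====
def Spec_split_with_spaces (text : String) (out : List String) : Prop := out = split_with_spaces_alt text
instance (text : String) (out : List String) : Decidable (Spec_split_with_spaces text out) := by unfold Spec_split_with_spaces; infer_instance

-- ===== CLAIM (what is proved, stated in full; the proofs are below) =====
def Claim_equal_split_with_spaces : Prop := ∀ (text : String), Dom_split_with_spaces text → Spec_split_with_spaces text (split_with_spaces text)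

-- ===== LEMMAS AND PROOFS =====

-- tokens A's loop will emit given pending word `cur` and remaining characters
def pvTok (cur : List Char) : List Char → List (List Char)
  | [] => if cur = [] then [] else [cur]
  | c :: cs =>
    if c = ' ' then (if cur = [] then [] else [cur]) ++ [' '] :: pvTok [] cs
    else pvTok (cur ++ [c]) cs

lemma pvTok_eq (cs : List Char) : ∀ cur : List Char,
    pvTok cur cs =
      if cur = [] then pvFindallTokens cs
      else (cur ++ cs.takeWhile (· ≠ ' ')) :: pvFindallTokens (cs.dropWhile (· ≠ ' ')) := by
  induction cs with
  | nil =>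
    intro cur
    by_cases h : cur = [] <;> simp [pvTok, pvFindallTokens, h]
  | cons c cs ih =>
    intro cur
    by_cases hc : c = ' '
    · subst hc
      by_cases h : cur = [] <;>
        simp [pvTok, pvFindallTokens, h, ih, List.takeWhile, List.dropWhile]
    · have h' : cur ++ [c] ≠ [] := by simp
      by_cases h : cur = [] <;>
        simp [pvTok, hc, ih, h, h', pvFindallTokens, List.takeWhile, List.dropWhile]

lemma pvLoop_eq (cs : List Char) : ∀ (res : List String) (cur : List Char),
    pvFlushA (cs.foldl pvStepA (res, cur)) = res ++ (pvTok cur cs).map String.mk := by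
  induction cs with
  | nil =>
    intro res cur
    by_cases h : cur = [] <;> simp [pvFlushA, pvTok, h]
  | cons c cs ih =>
    intro res cur
    rw [List.foldl_cons]
    by_cases hc : c = ' '
    · subst hc
      by_cases h : cur = []
      · rw [show pvStepA (res, cur) ' ' = (res ++ [" "], []) by simp [pvStepA, h]]
        simp [ih, pvTok, h]
        rfl
      · rw [show pvStepA (res, cur) ' ' = (res ++ [String.mk cur, " "], []) by
          simp [pvStepA, h]]
        simp [ih, pvTok, h]
        rfl
    · rw [show pvStepA (res, cur) c = (res, cur ++ [c]) by simp [pvStepA, hc]]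
      rw [ih]
      simp [pvTok, hc]

-- ===== VERDICT (by name: the statement is the Claim_ definition above) =====
theorem split_with_spaces_spec : Claim_equal_split_with_spaces := by
  intro text _
  unfold Spec_split_with_spaces split_with_spaces split_with_spaces_alt
  by_cases h : text = ""
  · simp [h]
  · rw [if_neg h, if_neg h, pvLoop_eq, pvTok_eq]
    simp
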